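-- pv_equiv track=rewrite | github.com/bdebf58/Proyecto-EBF2 | compare_neighbors_utils.py | compare_gene_neighbors
-- ===== SOURCE A (Python) =====
-- def compare_gene_neighbors(up_a, down_a, up_b, down_b):
--     genes_a = [g["gene"] for g in up_a + down_a]
--     genes_b = [g["gene"] for g in up_b + down_b]
--
--     set_a = set(genes_a)
--     set_b = set(genes_b)
--
--     shared = set_a.intersection(set_b)
--     unique_a = set_a - set_b
--     unique_b = set_b - set_a
--
--     return sorted(shared), sorted(unique_a), sorted(unique_b)
-- ===== SOURCE B (Python) =====
-- def compare_gene_neighbors(up_a, down_a, up_b, down_b):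
--     def sorted_unique(neighbors):
--         names = sorted(g["gene"] for g in neighbors)
--         out = []
--         for n in names:
--             if not out or out[-1] != n:
--                 out.append(n)
--         return out
--
--     a = sorted_unique(up_a + down_a)
--     b = sorted_unique(up_b + down_b)
--     shared, unique_a, unique_b = [], [], []
--     i = j = 0
--     while i < len(a) and j < len(b):
--         if a[i] == b[j]:
--             shared.append(a[i]); i += 1; j += 1
--         elif a[i] < b[j]:
--             unique_a.append(a[i]); i += 1
--         else:
--             unique_b.append(b[j]); j += 1
--     unique_a.extend(a[i:])
--     unique_b.extend(b[j:])
--     return shared, unique_a, unique_b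
-- ===== Notes on version B (the rewrite author's own statement) =====
-- stated objective: alternative
-- what changed: Replaces A's hash-set intersection/differences followed by three sorts with a sort-then-merge algorithm: each side's gene names are sorted and adjacent-deduplicated, then one two-pointer merge over the two sorted unique lists classifies every name into shared/unique_a/unique_b, already in sorted order with no final sort.
import Mathlib
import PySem

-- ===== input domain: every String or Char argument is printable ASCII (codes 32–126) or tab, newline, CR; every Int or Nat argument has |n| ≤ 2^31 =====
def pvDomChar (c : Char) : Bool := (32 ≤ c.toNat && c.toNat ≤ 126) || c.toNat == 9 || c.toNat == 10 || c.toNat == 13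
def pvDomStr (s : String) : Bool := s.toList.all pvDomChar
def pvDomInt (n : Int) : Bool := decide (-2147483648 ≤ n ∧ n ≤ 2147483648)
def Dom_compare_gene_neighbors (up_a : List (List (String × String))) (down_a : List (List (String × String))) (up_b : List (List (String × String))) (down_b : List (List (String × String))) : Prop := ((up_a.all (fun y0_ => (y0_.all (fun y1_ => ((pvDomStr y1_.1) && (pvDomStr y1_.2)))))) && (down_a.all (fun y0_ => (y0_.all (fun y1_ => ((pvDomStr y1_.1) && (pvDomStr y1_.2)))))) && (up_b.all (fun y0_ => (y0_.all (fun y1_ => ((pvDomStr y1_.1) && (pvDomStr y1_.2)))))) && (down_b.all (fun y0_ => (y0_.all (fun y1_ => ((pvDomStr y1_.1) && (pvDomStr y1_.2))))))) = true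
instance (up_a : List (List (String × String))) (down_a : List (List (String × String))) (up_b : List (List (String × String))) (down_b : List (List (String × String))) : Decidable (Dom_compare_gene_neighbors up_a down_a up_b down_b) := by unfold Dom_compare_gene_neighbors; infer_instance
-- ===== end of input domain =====

-- B replaces A's hash-set intersection/differences plus three final sorts by a sort-then-merge
-- algorithm: sort and adjacent-deduplicate each side's gene names, then classify every name with
-- one two-pointer merge of the two sorted unique lists; objective: alternative.

-- g["gene"]: total form of the dict lookup; Pre_ guarantees the key "gene" exists (else Python raises KeyError)
def pvGene (g : List (String × String)) : String :=
  ((PySem.Dict.mk g).get? "gene").getD ""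

-- ===== PORT A =====
def compare_gene_neighbors (up_a : List (List (String × String))) (down_a : List (List (String × String))) (up_b : List (List (String × String))) (down_b : List (List (String × String))) : List String × List String × List String :=
  let genes_a := (up_a ++ down_a).map pvGene
  let genes_b := (up_b ++ down_b).map pvGene
  let set_a := PySem.Set.ofList genes_a
  let set_b := PySem.Set.ofList genes_b
  let shared := PySem.Set.inter set_a set_b
  let unique_a := PySem.Set.diff set_a set_b
  let unique_b := PySem.Set.diff set_b set_a
  (PySem.List.sorted shared (fun x => x) false,
   PySem.List.sorted unique_a (fun x => x) false,
   PySem.List.sorted unique_b (fun x => x) false)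

-- ===== PORT B =====
-- sorted_unique: sort the gene names, then drop adjacent repeats ('if not out or out[-1] != n')
def pvSortedUnique (neighbors : List (List (String × String))) : List String :=
  let names := PySem.List.sorted (neighbors.map pvGene) (fun x => x) false
  names.foldl (fun out n => if out.isEmpty || out.getLast? != some n then out ++ [n] else out) []

-- the two-pointer while loop: each iteration consumes the head of one (or both) suffixes
def pvMerge : List String → List String → List String × List String × List String
  | [], b => ([], [], b)                      -- 'unique_b.extend(b[j:])'
  | x :: xs, [] => ([], x :: xs, [])          -- 'unique_a.extend(a[i:])'
  | x :: xs, y :: ys =>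
    if x = y then
      let r := pvMerge xs ys
      (x :: r.1, r.2.1, r.2.2)
    else if x < y then
      let r := pvMerge xs (y :: ys)
      (r.1, x :: r.2.1, r.2.2)
    else
      let r := pvMerge (x :: xs) ys
      (r.1, r.2.1, y :: r.2.2)
termination_by a b => a.length + b.length

def compare_gene_neighbors_alt (up_a : List (List (String × String))) (down_a : List (List (String × String))) (up_b : List (List (String × String))) (down_b : List (List (String × String))) : List String × List String × List String :=
  let a := pvSortedUnique (up_a ++ down_a)
  let b := pvSortedUnique (up_b ++ down_b)
  pvMerge a b

-- ===== PRECONDITION & SPEC =====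
-- Pre_ excludes exactly the inputs where some neighbor dict lacks the key "gene": there A raises KeyError.
def Pre_compare_gene_neighbors (up_a : List (List (String × String))) (down_a : List (List (String × String))) (up_b : List (List (String × String))) (down_b : List (List (String × String))) : Prop :=
  ((up_a ++ down_a ++ up_b ++ down_b).all (fun g => g.any (fun kv => kv.1 == "gene"))) = true
instance (up_a : List (List (String × String))) (down_a : List (List (String × String))) (up_b : List (List (String × String))) (down_b : List (List (String × String))) : Decidable (Pre_compare_gene_neighbors up_a down_a up_b down_b) := by unfold Pre_compare_gene_neighbors; infer_instance

def pvWitness_compare_gene_neighbors : (List (List (String × String))) × (List (List (String × String))) × (List (List (String × String))) × (List (List (String × String))) :=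
  ([[("gene", "a"), ("fc", "2")]], [[("gene", "b")]], [[("gene", "a")]], [[("gene", "c")]])

def Spec_compare_gene_neighbors (up_a : List (List (String × String))) (down_a : List (List (String × String))) (up_b : List (List (String × String))) (down_b : List (List (String × String))) (out : List String × List String × List String) : Prop := out = compare_gene_neighbors_alt up_a down_a up_b down_b
instance (up_a : List (List (String × String))) (down_a : List (List (String × String))) (up_b : List (List (String × String))) (down_b : List (List (String × String))) (out : List String × List String × List String) : Decidable (Spec_compare_gene_neighbors up_a down_a up_b down_b out) := by unfold Spec_compare_gene_neighbors; infer_instance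

-- ===== CLAIM (what is proved, stated in full; the proofs are below) =====
def Claim_equal_compare_gene_neighbors : Prop := ∀ (up_a : List (List (String × String))) (down_a : List (List (String × String))) (up_b : List (List (String × String))) (down_b : List (List (String × String))), Dom_compare_gene_neighbors up_a down_a up_b down_b → Pre_compare_gene_neighbors up_a down_a up_b down_b → Spec_compare_gene_neighbors up_a down_a up_b down_b (compare_gene_neighbors up_a down_a up_b down_b)

-- ===== LEMMAS AND PROOFS =====

-- in a ≤-sorted list the last element is maximal
lemma pv_mem_le_getLast (acc : List String) (h : acc.Pairwise (· ≤ ·)) (p : String)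
    (hp : acc.getLast? = some p) : ∀ a ∈ acc, a ≤ p := by
  induction acc with
  | nil => simp at hp
  | cons a t ih =>
    rcases List.pairwise_cons.1 h with ⟨hat, ht⟩
    cases t with
    | nil => simp_all
    | cons b u =>
      rw [List.getLast?_cons_cons] at hp
      intro x hx
      rcases List.mem_cons.1 hx with rfl | hx
      · exact le_trans (hat b (by simp)) (ih ht hp b (by simp))
      · exact ih ht hp x hx

-- the adjacent-dedup fold of a ≤-sorted list: strictly sorted, same members
lemma pv_foldDedup (l : List String) : ∀ (acc : List String), l.Pairwise (· ≤ ·) →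
    acc.Pairwise (· < ·) →
    (∀ p, acc.getLast? = some p → ∀ b ∈ l, p ≤ b) →
    (l.foldl (fun out n => if out.isEmpty || out.getLast? != some n then out ++ [n] else out) acc).Pairwise (· < ·)
    ∧ ∀ x, x ∈ l.foldl (fun out n => if out.isEmpty || out.getLast? != some n then out ++ [n] else out) acc ↔ x ∈ acc ∨ x ∈ l := by
  induction l with
  | nil => intro acc _ hacc _; simpa using hacc
  | cons n t ih =>
    intro acc hl hacc hlast
    rcases List.pairwise_cons.1 hl with ⟨hnt, ht⟩
    rw [List.foldl_cons]
    by_cases hc : acc.getLast? = some n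
    · have hstep : (if acc.isEmpty || acc.getLast? != some n then acc ++ [n] else acc) = acc := by
        have : acc.isEmpty = false := by
          cases acc <;> simp_all
        simp [this, hc]
      rw [hstep]
      have := ih acc ht hacc (by
        intro p hp b hb
        rw [hc] at hp; cases hp
        exact hnt b hb)
      refine ⟨this.1, fun x => ?_⟩
      rw [this.2 x]
      have hnmem : n ∈ acc := List.mem_of_getLast? hc
      constructor
      · rintro (h | h)
        · exact Or.inl h
        · exact Or.inr (List.mem_cons_of_mem _ h)
      · rintro (h | h)
        · exact Or.inl h
        · rcases List.mem_cons.1 h with rfl | h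
          · exact Or.inl hnmem
          · exact Or.inr h
    · have hstep : (if acc.isEmpty || acc.getLast? != some n then acc ++ [n] else acc) = acc ++ [n] := by
        simp [hc]
      rw [hstep]
      have hacc' : (acc ++ [n]).Pairwise (· < ·) := by
        rw [List.pairwise_append]
        refine ⟨hacc, by simp, ?_⟩
        intro a ha b hb
        rw [List.mem_singleton] at hb
        rw [hb]
        cases hacc2 : acc.getLast? with
        | none => simp [List.getLast?_eq_none_iff] at hacc2; subst hacc2; simp at ha
        | some p =>
          have hap : a ≤ p := pv_mem_le_getLast acc (hacc.imp le_of_lt) p hacc2 a ha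
          have hpn : p ≤ n := hlast p hacc2 n (by simp)
          have : p ≠ n := fun h => hc (h ▸ hacc2)
          exact lt_of_le_of_lt hap (lt_of_le_of_ne hpn this)
      have := ih (acc ++ [n]) ht hacc' (by
        intro p hp b hb
        rw [List.getLast?_concat] at hp; cases hp
        exact hnt b hb)
      refine ⟨this.1, fun x => ?_⟩
      rw [this.2 x]
      simp [List.mem_append, List.mem_cons]
      tauto

-- pvSortedUnique is strictly sorted and holds exactly the gene names
lemma pv_sortedUnique_spec (ns : List (List (String × String))) :
    (pvSortedUnique ns).Pairwise (· < ·)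
    ∧ ∀ x, x ∈ pvSortedUnique ns ↔ x ∈ ns.map pvGene := by
  unfold pvSortedUnique
  have hs : (PySem.List.sorted (ns.map pvGene) (fun x => x) false).Pairwise (· ≤ ·) := by
    simpa using PySem.List.sorted_pairwise (ns.map pvGene) (fun x => x)
  have h := pv_foldDedup (PySem.List.sorted (ns.map pvGene) (fun x => x) false) [] hs
    (by simp) (by simp)
  refine ⟨h.1, fun x => ?_⟩
  rw [h.2 x]
  simp [PySem.List.mem_sorted]

-- the merge of two strictly sorted lists is the three membership filters
lemma pv_merge_eq (a b : List String) (ha : a.Pairwise (· < ·)) (hb : b.Pairwise (· < ·)) :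
    pvMerge a b = (a.filter (fun x => decide (x ∈ b)),
                   a.filter (fun x => decide (x ∉ b)),
                   b.filter (fun x => decide (x ∉ a))) := by
  induction a, b using pvMerge.induct with
  | case1 b => simp [pvMerge]
  | case2 x xs => simp [pvMerge]
  | case3 ta h tb ih =>
    rcases List.pairwise_cons.1 ha with ⟨hha, ha'⟩
    rcases List.pairwise_cons.1 hb with ⟨hhb, hb'⟩
    rw [show pvMerge (h :: ta) (h :: tb)
        = (h :: (pvMerge ta tb).1, (pvMerge ta tb).2.1, (pvMerge ta tb).2.2) from by
      simp [pvMerge]]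
    rw [ih ha' hb']
    have e1 : List.filter (fun z => decide (z ∈ h :: tb)) (h :: ta)
        = h :: List.filter (fun z => decide (z ∈ tb)) ta := by
      rw [List.filter_cons_of_pos (by simp)]
      congr 1
      exact List.filter_congr (fun z hz => by
        have : z ≠ h := ne_of_gt (hha z hz)
        simp [List.mem_cons, this])
    have e2 : List.filter (fun z => decide (z ∉ h :: tb)) (h :: ta)
        = List.filter (fun z => decide (z ∉ tb)) ta := by
      rw [List.filter_cons_of_neg (by simp)]
      exact List.filter_congr (fun z hz => by
        have : z ≠ h := ne_of_gt (hha z hz)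
        simp [List.mem_cons, this])
    have e3 : List.filter (fun z => decide (z ∉ h :: ta)) (h :: tb)
        = List.filter (fun z => decide (z ∉ ta)) tb := by
      rw [List.filter_cons_of_neg (by simp)]
      exact List.filter_congr (fun z hz => by
        have : z ≠ h := ne_of_gt (hhb z hz)
        simp [List.mem_cons, this])
    rw [e1, e2, e3]
  | case4 x xs y ys hne hlt ih =>
    rcases List.pairwise_cons.1 ha with ⟨hha, ha'⟩
    rcases List.pairwise_cons.1 hb with ⟨hhb, hb'⟩
    rw [show pvMerge (x :: xs) (y :: ys)
        = ((pvMerge xs (y :: ys)).1, x :: (pvMerge xs (y :: ys)).2.1, (pvMerge xs (y :: ys)).2.2) from by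
      simp [pvMerge, hne, hlt]]
    rw [ih ha' hb]
    have hxny : x ∉ y :: ys := by
      intro hx
      rcases List.mem_cons.1 hx with rfl | hx
      · exact hne rfl
      · exact absurd (lt_trans hlt (hhb x hx)) (lt_irrefl x)
    have e1 : List.filter (fun z => decide (z ∈ y :: ys)) (x :: xs)
        = List.filter (fun z => decide (z ∈ y :: ys)) xs := by
      rw [List.filter_cons_of_neg (by simp [hxny])]
    have e2 : List.filter (fun z => decide (z ∉ y :: ys)) (x :: xs)
        = x :: List.filter (fun z => decide (z ∉ y :: ys)) xs := by
      rw [List.filter_cons_of_pos (by simp [hxny])]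
    have e3 : List.filter (fun z => decide (z ∉ x :: xs)) (y :: ys)
        = List.filter (fun z => decide (z ∉ xs)) (y :: ys) := by
      exact List.filter_congr (fun z hz => by
        have hz' : x < z := by
          rcases List.mem_cons.1 hz with rfl | hz
          · exact hlt
          · exact lt_trans hlt (hhb z hz)
        have : z ≠ x := ne_of_gt hz'
        simp [List.mem_cons, this])
    rw [e1, e2, e3]
  | case5 x xs y ys hne hnlt ih =>
    rcases List.pairwise_cons.1 ha with ⟨hha, ha'⟩
    rcases List.pairwise_cons.1 hb with ⟨hhb, hb'⟩
    have hgt : y < x := by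
      rcases lt_trichotomy x y with h | h | h
      · exact absurd h hnlt
      · exact absurd h hne
      · exact h
    rw [show pvMerge (x :: xs) (y :: ys)
        = ((pvMerge (x :: xs) ys).1, (pvMerge (x :: xs) ys).2.1, y :: (pvMerge (x :: xs) ys).2.2) from by
      simp [pvMerge, hne, hnlt]]
    rw [ih ha hb']
    have hynx : y ∉ x :: xs := by
      intro hy
      rcases List.mem_cons.1 hy with rfl | hy
      · exact hne rfl
      · exact absurd (lt_trans hgt (hha y hy)) (lt_irrefl y)
    have e1 : List.filter (fun z => decide (z ∈ y :: ys)) (x :: xs)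
        = List.filter (fun z => decide (z ∈ ys)) (x :: xs) := by
      exact List.filter_congr (fun z hz => by
        have hz' : y < z := by
          rcases List.mem_cons.1 hz with rfl | hz
          · exact hgt
          · exact lt_trans hgt (hha z hz)
        have : z ≠ y := ne_of_gt hz'
        simp [List.mem_cons, this])
    have e2 : List.filter (fun z => decide (z ∉ y :: ys)) (x :: xs)
        = List.filter (fun z => decide (z ∉ ys)) (x :: xs) := by
      exact List.filter_congr (fun z hz => by
        have hz' : y < z := by
          rcases List.mem_cons.1 hz with rfl | hz
          · exact hgt
          · exact lt_trans hgt (hha z hz)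
        have : z ≠ y := ne_of_gt hz'
        simp [List.mem_cons, this])
    have e3 : List.filter (fun z => decide (z ∉ x :: xs)) (y :: ys)
        = y :: List.filter (fun z => decide (z ∉ x :: xs)) ys := by
      rw [List.filter_cons_of_pos (by simp [hynx])]
    rw [e1, e2, e3]

-- sorted(s) of a Nodup s equals a strictly sorted filter with the same members
lemma pv_sorted_filter (s : List String) (xs : List String) (p : String → Bool)
    (hs : s.Nodup) (hx : xs.Pairwise (· < ·))
    (hmem : ∀ z, z ∈ s ↔ z ∈ xs ∧ p z = true) :
    PySem.List.sorted s (fun x => x) false = xs.filter p := by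
  apply PySem.List.sorted_eq_of_perm_of_pairwise_lt
  · apply (List.perm_ext_iff_of_nodup ((hx.imp (fun h => ne_of_lt h)).filter p) hs).2
    intro z
    rw [List.mem_filter, hmem]
  · exact hx.filter p

-- ===== VERDICT (by name: the statement is the Claim_ definition above) =====
theorem compare_gene_neighbors_spec : Claim_equal_compare_gene_neighbors := by
  intro up_a down_a up_b down_b _ _
  unfold Spec_compare_gene_neighbors compare_gene_neighbors compare_gene_neighbors_alt

  obtain ⟨hpa, hma⟩ := pv_sortedUnique_spec (up_a ++ down_a)
  obtain ⟨hpb, hmb⟩ := pv_sortedUnique_spec (up_b ++ down_b)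
  set sa := pvSortedUnique (up_a ++ down_a)
  set sb := pvSortedUnique (up_b ++ down_b)
  rw [pv_merge_eq sa sb hpa hpb]
  have hna := PySem.Set.nodup_ofList ((up_a ++ down_a).map pvGene)
  have hnb := PySem.Set.nodup_ofList ((up_b ++ down_b).map pvGene)
  refine Prod.ext ?_ (Prod.ext ?_ ?_)
  · apply pv_sorted_filter _ _ _ (PySem.Set.nodup_inter _ _ hna) hpa
    intro z
    rw [PySem.Set.mem_inter]
    simp [PySem.Set.mem_ofList, hma, hmb]
  · apply pv_sorted_filter _ _ _ (PySem.Set.nodup_diff _ _ hna) hpa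
    intro z
    rw [PySem.Set.mem_diff]
    simp [PySem.Set.mem_ofList, hma, hmb]
  · apply pv_sorted_filter _ _ _ (PySem.Set.nodup_diff _ _ hnb) hpb
    intro z
    rw [PySem.Set.mem_diff]
    simp [PySem.Set.mem_ofList, hma, hmb]
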